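-- pv_equiv track=rewrite | github.com/Edsel-Tan/dashboard | Solutions/882.py | statify
-- ===== SOURCE A (Python) =====
-- def statify(x):
--     b = bin(x)[2:]
--     c = 0
--     output = []
--     for i in range(len(b)):
--         j = int(b[i])
--         if j == 0:
--             c += 1
--             if c >= 0 and (i+1 == len(b) or b[i+1] == '1'):
--                 output.append(c)
--                 c = 0
--         else:
--             c -= 1
--     return tuple(output)
-- ===== SOURCE B (Python) =====
-- def statify(x):
--     b = bin(x)[2:]
--     out = []
--     c = 0
--     i = 0
--     while i < len(b):
--         j = i
--         while j < len(b) and b[j] == b[i]: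
--             j += 1
--         n = j - i
--         if int(b[i]):
--             c -= n
--         else:
--             c += n
--             if c >= 0:
--                 out.append(c)
--                 c = 0
--         i = j
--     return tuple(out)
-- ===== Notes on version B (the rewrite author's own statement) =====
-- stated objective: alternative
-- what changed: B replaces A's per-bit indexed loop with one-character lookahead by a run-length scan over maximal runs of equal bits, updating the counter once per run and emitting once per zeros-run.
import Mathlib
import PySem

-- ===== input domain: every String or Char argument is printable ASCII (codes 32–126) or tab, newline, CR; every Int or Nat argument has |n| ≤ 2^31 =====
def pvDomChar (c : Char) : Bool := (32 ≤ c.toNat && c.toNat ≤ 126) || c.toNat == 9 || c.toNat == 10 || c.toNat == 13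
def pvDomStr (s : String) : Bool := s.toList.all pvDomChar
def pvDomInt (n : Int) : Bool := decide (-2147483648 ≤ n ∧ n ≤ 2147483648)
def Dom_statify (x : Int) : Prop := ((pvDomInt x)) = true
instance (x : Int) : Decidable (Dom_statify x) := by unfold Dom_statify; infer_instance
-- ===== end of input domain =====

-- B processes the bit string run by run instead of bit by bit; same result on all x ≥ 0, both raise on x < 0.

-- ===== PORT A =====
-- bin(x)[2:] for x ≥ 0, as a list of '0'/'1' characters
def pvBinAux : Nat → List Char
  | 0 => []
  | n+1 => pvBinAux ((n+1)/2) ++ [if (n+1) % 2 = 1 then '1' else '0']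
decreasing_by exact Nat.div_lt_self (Nat.succ_pos n) (by norm_num)

def pvBinStr (x : Int) : List Char := if x ≤ 0 then ['0'] else pvBinAux x.toNat

-- A's loop over i in range(len(b)); the tail `rest` is b[i+1:], so b[i+1] is rest.head?
def pvLoopA : List Char → Int → List Int → List Int
  | [], _, out => out
  | ch :: rest, c, out =>
    -- j = int(b[i]); on the admitted inputs ch is '0' or '1'
    if ch = '0' then
      let c' := c + 1
      if c' ≥ 0 ∧ (rest = [] ∨ rest.head? = some '1') then
        pvLoopA rest 0 (out ++ [c'])
      else
        pvLoopA rest c' out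
    else
      pvLoopA rest (c - 1) out

def statify (x : Int) : List Int := pvLoopA (pvBinStr x) 0 []

-- ===== PORT B =====
-- run-length decomposition of the bit string (the inner `while b[j] == b[i]` scan is `span`)
def pvRuns : List Char → List (Char × Nat)
  | [] => []
  | a :: rest =>
    let p := rest.span (· == a)
    (a, p.1.length + 1) :: pvRuns p.2
termination_by l => l.length
decreasing_by
  simp only [List.span_eq_takeWhile_dropWhile, List.length_cons]
  exact Nat.lt_succ_of_le (List.length_dropWhile_le _ _)

def pvLoopB : List (Char × Nat) → Int → List Int → List Int
  | [], _, out => out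
  | (bit, n) :: rest, c, out =>
    if bit = '0' then
      let c' := c + n
      if c' ≥ 0 then pvLoopB rest 0 (out ++ [c']) else pvLoopB rest c' out
    else
      pvLoopB rest (c - n) out

def statify_alt (x : Int) : List Int := pvLoopB (pvRuns (pvBinStr x)) 0 []

-- ===== PRECONDITION & SPEC =====
-- Pre_ excludes x < 0: there bin(x)[2:] starts with 'b', and int('b') raises ValueError in both A and B.
def Pre_statify (x : Int) : Prop := 0 ≤ x
instance (x : Int) : Decidable (Pre_statify x) := by unfold Pre_statify; infer_instance
def pvWitness_statify : Int := 6
def Spec_statify (x : Int) (out : List Int) : Prop := out = statify_alt x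
instance (x : Int) (out : List Int) : Decidable (Spec_statify x out) := by unfold Spec_statify; infer_instance

-- ===== CLAIM (what is proved, stated in full; the proofs are below) =====
def Claim_equal_statify : Prop := ∀ (x : Int), Dom_statify x → Pre_statify x → Spec_statify x (statify x)

-- ===== LEMMAS AND PROOFS =====

-- one-step unfoldings of A's loop
theorem pvLoopA_cons0 (rest : List Char) (c : Int) (out : List Int) :
    pvLoopA ('0' :: rest) c out =
      if c + 1 ≥ 0 ∧ (rest = [] ∨ rest.head? = some '1') then pvLoopA rest 0 (out ++ [c + 1])
      else pvLoopA rest (c + 1) out := by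
  rw [pvLoopA]
  simp

theorem pvLoopA_cons1 (rest : List Char) (c : Int) (out : List Int) :
    pvLoopA ('1' :: rest) c out = pvLoopA rest (c - 1) out := by
  rw [pvLoopA]
  simp

-- every character pvBinStr produces is '0' or '1'
theorem pvBinAux_mem : ∀ (n : Nat) (ch : Char), ch ∈ pvBinAux n → ch = '0' ∨ ch = '1' := by
  intro n
  induction n using Nat.strong_induction_on with
  | _ n ih =>
    intro ch h
    match n with
    | 0 => simp [pvBinAux] at h
    | m+1 =>
      rw [pvBinAux] at h
      rcases List.mem_append.mp h with h1 | h2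
      · exact ih ((m+1)/2) (Nat.div_lt_self (Nat.succ_pos m) (by norm_num)) ch h1
      · simp at h2; split at h2 <;> simp [h2]

theorem pvBinStr_mem (x : Int) (ch : Char) (h : ch ∈ pvBinStr x) : ch = '0' ∨ ch = '1' := by
  unfold pvBinStr at h
  split at h
  · simp at h; simp [h]
  · exact pvBinAux_mem _ _ h

-- A's loop through a maximal run of ones
theorem pvLoopA_ones (tk : List Char) (h : ∀ y ∈ tk, y = '1') :
    ∀ (dr : List Char) (c : Int) (out : List Int),
      pvLoopA ('1' :: (tk ++ dr)) c out = pvLoopA dr (c - ((tk.length : Int) + 1)) out := by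
  induction tk with
  | nil =>
    intro dr c out
    rw [List.nil_append, pvLoopA_cons1]
    norm_num
  | cons y ys ih =>
    intro dr c out
    have hy : y = '1' := h y (by simp)
    subst hy
    have hys : ∀ z ∈ ys, z = '1' := fun z hz => h z (by simp [hz])
    rw [show (('1' :: ys : List Char) ++ dr) = '1' :: (ys ++ dr) from rfl, pvLoopA_cons1,
      ih hys dr (c - 1) out]
    congr 1
    simp only [List.length_cons]
    push_cast
    ring

-- A's loop through a maximal run of zeros followed by end-of-string or a '1'
theorem pvLoopA_zeros (tk : List Char) (h : ∀ y ∈ tk, y = '0') :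
    ∀ (dr : List Char), (dr = [] ∨ dr.head? = some '1') →
    ∀ (c : Int) (out : List Int),
      pvLoopA ('0' :: (tk ++ dr)) c out =
        (if c + (tk.length : Int) + 1 ≥ 0 then pvLoopA dr 0 (out ++ [c + (tk.length : Int) + 1])
         else pvLoopA dr (c + (tk.length : Int) + 1) out) := by
  induction tk with
  | nil =>
    intro dr hdr c out
    rw [List.nil_append, pvLoopA_cons0]
    simp only [List.length_nil, Int.natCast_zero, add_zero]
    by_cases hc : c + 1 ≥ 0
    · rw [if_pos ⟨hc, hdr⟩, if_pos hc]
    · rw [if_neg (fun hx => hc hx.1), if_neg hc]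
  | cons y ys ih =>
    intro dr hdr c out
    have hy : y = '0' := h y (by simp)
    subst hy
    have hys : ∀ z ∈ ys, z = '0' := fun z hz => h z (by simp [hz])
    rw [show (('0' :: ys : List Char) ++ dr) = '0' :: (ys ++ dr) from rfl, pvLoopA_cons0]
    rw [if_neg (by rintro ⟨-, h1 | h1⟩ <;> simp at h1)]
    rw [ih hys dr hdr (c + 1) out]
    have e : c + 1 + (ys.length : Int) + 1 = c + ((ys.length : Int) + 1) + 1 := by ring
    simp only [List.length_cons]
    push_cast
    rw [e]

-- the per-bit loop on b equals the per-run loop on the runs of b, for bit strings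
theorem pvMain : ∀ (n : Nat) (b : List Char), b.length = n → (∀ ch ∈ b, ch = '0' ∨ ch = '1') →
    ∀ (c : Int) (out : List Int), pvLoopA b c out = pvLoopB (pvRuns b) c out := by
  intro n
  induction n using Nat.strong_induction_on with
  | _ n ih =>
    intro b hn hmem c out
    match b with
    | [] => rw [pvRuns]; rfl
    | a :: rest =>
      rcases hspan : rest.span (· == a) with ⟨tk, dr⟩
      rw [List.span_eq_takeWhile_dropWhile] at hspan
      have htk : tk = rest.takeWhile (· == a) := by
        have := congrArg Prod.fst hspan; simpa using this.symm
      have hdr : dr = rest.dropWhile (· == a) := by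
        have := congrArg Prod.snd hspan; simpa using this.symm
      have hsplit : rest = tk ++ dr := by
        rw [htk, hdr]; exact (List.takeWhile_append_dropWhile).symm
      have htkmem : ∀ y ∈ tk, y = a := by
        intro y hy
        rw [htk] at hy
        have := List.mem_takeWhile_imp hy
        simpa using this
      have hdrsub : ∀ y ∈ dr, y ∈ rest := by
        intro y hy; rw [hsplit]; exact List.mem_append_right _ hy
      have hruns : pvRuns (a :: rest) = (a, tk.length + 1) :: pvRuns dr := by
        rw [pvRuns]
        simp only [List.span_eq_takeWhile_dropWhile, ← htk, ← hdr]
      have hlen : dr.length < n := by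
        have h1 := List.length_dropWhile_le (· == a) rest
        rw [← hdr] at h1
        simp only [List.length_cons] at hn
        omega
      have ihdr : ∀ (c : Int) (out : List Int), pvLoopA dr c out = pvLoopB (pvRuns dr) c out :=
        ih dr.length hlen dr rfl
          (fun ch hch => hmem ch (List.mem_cons_of_mem _ (hdrsub ch hch)))
      have hb : a :: rest = a :: (tk ++ dr) := by rw [← hsplit]
      have hhead := List.head?_dropWhile_not (· == a) rest
      rw [← hdr] at hhead
      rcases hmem a (List.mem_cons_self) with ha | ha
      · -- zeros run
        subst ha
        have hdrhead : dr = [] ∨ dr.head? = some '1' := by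
          match hDr : dr with
          | [] => exact Or.inl rfl
          | y :: ys =>
            right
            simp only [List.head?_cons] at hhead
            have hy0 : ¬ (y = '0') := by
              intro hy; rw [hy] at hhead; simp at hhead
            rcases hmem y (List.mem_cons_of_mem _ (hdrsub y (by simp))) with h0 | h1
            · exact absurd h0 hy0
            · simp [h1]
        rw [hb] at hruns ⊢
        rw [pvLoopA_zeros tk htkmem dr hdrhead c out, hruns]
        have hB : pvLoopB (('0', tk.length + 1) :: pvRuns dr) c out =
            if c + ((tk.length : Int) + 1) ≥ 0 then
              pvLoopB (pvRuns dr) 0 (out ++ [c + ((tk.length : Int) + 1)])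
            else pvLoopB (pvRuns dr) (c + ((tk.length : Int) + 1)) out := by
          rw [pvLoopB]
          push_cast
          ring_nf
        rw [hB, ← add_assoc]
        by_cases hc : c + (tk.length : Int) + 1 ≥ 0
        · rw [if_pos hc, if_pos hc, ihdr]
        · rw [if_neg hc, if_neg hc, ihdr]
      · -- ones run
        subst ha
        rw [hb] at hruns ⊢
        rw [pvLoopA_ones tk htkmem dr c out, hruns, ihdr]
        have h1 : ('1' : Char) ≠ '0' := by decide
        rw [pvLoopB, if_neg h1]
        congr 1

-- ===== VERDICT (by name: the statement is the Claim_ definition above) =====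
theorem statify_spec : Claim_equal_statify := by
  intro x _ _
  unfold Spec_statify statify statify_alt
  exact pvMain (pvBinStr x).length (pvBinStr x) rfl (pvBinStr_mem x) 0 []
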